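-- pv_equiv track=rewrite | github.com/yuchouxuan/study-ctf | utfc/EZcry.py | _ql4
-- ===== SOURCE A (Python) =====
-- def _ql4(txt, h, l=0):
--     t = str(txt).replace(" ", "");
--     if h == 0: return;
--     if (l == 0): l = int(t.__len__() / h);
--     box = [""] * h * l
--     desc = False
--     cont = 0
--     for lx in range(l):
--         thl = lx
--         for hx in range(h):
--             thh = hx
--             if (desc): thh = h - hx - 1
--             if (cont < t.__len__()): box[(thh) * l + thl] = t[cont]
--             cont += 1
--         desc = not desc
--     return box
-- ===== SOURCE B (Python) =====
-- def _ql4(txt, h, l=0):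
--     t = str(txt).replace(" ", "")
--     if h == 0:
--         return None
--     if l == 0:
--         l = int(len(t) / h)
--     n = len(t)
--     return [t[i] if (i := c * h + (r if c % 2 == 0 else h - r - 1)) < n else ""
--             for r in range(h) for c in range(l)]
-- ===== Notes on version B (the rewrite author's own statement) =====
-- stated objective: simpler
-- what changed: B inverts A's scatter (walking source characters and writing them into a mutated box) into a gather: a single comprehension over destination cells (row, col) that computes each cell's source index in closed form, with no mutable box, desc flag or cont counter.
import Mathlib
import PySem

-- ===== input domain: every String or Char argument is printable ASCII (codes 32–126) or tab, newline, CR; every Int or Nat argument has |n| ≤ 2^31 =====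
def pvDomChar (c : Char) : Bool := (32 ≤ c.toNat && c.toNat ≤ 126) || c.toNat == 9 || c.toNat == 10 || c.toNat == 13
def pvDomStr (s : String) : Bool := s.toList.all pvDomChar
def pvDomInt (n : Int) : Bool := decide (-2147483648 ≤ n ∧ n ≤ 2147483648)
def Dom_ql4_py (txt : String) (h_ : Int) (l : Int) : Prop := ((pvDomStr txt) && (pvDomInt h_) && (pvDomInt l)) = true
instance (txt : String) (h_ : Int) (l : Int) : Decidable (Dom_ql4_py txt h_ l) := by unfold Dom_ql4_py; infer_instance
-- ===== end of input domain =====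

-- B replaces A's scatter loop (mutating a box while walking source characters) by a
-- gather: one pass over destination cells computing each source index in closed form
-- (objective: simpler; same O(h*l) cost).


-- ===== PORT A =====
-- inner loop body: for hx in range(h): thh = hx / h-hx-1; if cont < len(t): box[thh*l+thl] = t[cont]; cont += 1
-- (the assigned index is ≥ 0 and < len(box) whenever the assignment runs, so `.toNat` + Lean's clamping List.set is exact)
def ql4InnerStep (t : List Char) (h_ l thl : Int) (desc : Bool) (bc : List String × Int) (hx : Int) : List String × Int :=
  let thh := if desc then h_ - hx - 1 else hx
  let b := if bc.2 < (t.length : Int)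
    then bc.1.set (thh * l + thl).toNat (((PySem.List.pyGet? t bc.2).map (fun c => String.ofList [c])).getD "")
    else bc.1
  (b, bc.2 + 1)

-- outer loop body: one column lx, then desc = not desc
def ql4OuterStep (t : List Char) (h_ l : Int) (st : List String × Bool × Int) (lx : Int) : List String × Bool × Int :=
  let inner := (PySem.List.pyRange 0 h_ 1).foldl (ql4InnerStep t h_ l lx st.2.1) (st.1, st.2.2)
  (inner.1, !st.2.1, inner.2)

def ql4_py (txt : String) (h_ : Int) (l : Int) : Option (List String) :=
  let t : List Char := PySem.Chars.replace txt.toList [' '] []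
  if h_ = 0 then none else
  let l : Int := if l = 0 then PySem.Int.truncdiv (t.length : Int) h_ else l
  let box : List String := List.replicate (h_.toNat * l.toNat) ""
  some ((PySem.List.pyRange 0 l 1).foldl (ql4OuterStep t h_ l) (box, false, 0)).1

-- ===== PORT B =====
-- source index of destination cell (row r, column c)
def ql4Src (h_ r c : Int) : Int :=
  let hx := if PySem.Int.mod c 2 = 0 then r else h_ - r - 1
  c * h_ + hx

def ql4_py_alt (txt : String) (h_ : Int) (l : Int) : Option (List String) :=
  let t : List Char := PySem.Chars.replace txt.toList [' '] []
  if h_ = 0 then none else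
  let l : Int := if l = 0 then PySem.Int.truncdiv (t.length : Int) h_ else l
  some ((PySem.List.pyRange 0 h_ 1).flatMap (fun r =>
    (PySem.List.pyRange 0 l 1).map (fun c =>
      let cont := ql4Src h_ r c
      if cont < (t.length : Int)
      then ((PySem.List.pyGet? t cont).map (fun ch => String.ofList [ch])).getD ""
      else "")))

-- ===== PRECONDITION & SPEC =====
def Spec_ql4_py (txt : String) (h_ : Int) (l : Int) (out : Option (List String)) : Prop := out = ql4_py_alt txt h_ l
instance (txt : String) (h_ : Int) (l : Int) (out : Option (List String)) : Decidable (Spec_ql4_py txt h_ l out) := by unfold Spec_ql4_py; infer_instance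

-- ===== CLAIM (what is proved, stated in full; the proofs are below) =====
def Claim_equal_ql4_py : Prop := ∀ (txt : String) (h_ : Int) (l : Int), Dom_ql4_py txt h_ l → Spec_ql4_py txt h_ l (ql4_py txt h_ l)

-- ===== LEMMAS AND PROOFS =====

-- the value B computes for destination cell j (row-major flat index), Nat form
def cellG (t : List Char) (H L j : Nat) : String :=
  let c := j % L
  let r := j / L
  let hx := if c % 2 = 0 then r else H - r - 1
  let cont := c * H + hx
  if hlt : cont < t.length then String.ofList [t[cont]] else ""

-- box contents of A after k full columns and m rows of column k
def colFill (t : List Char) (H L k m : Nat) (j : Nat) : String :=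
  if j % L < k ∨ (j % L = k ∧ (if k % 2 = 1 then H - m ≤ j / L else j / L < m)) then cellG t H L j else ""

lemma set_map_range (f : Nat → String) (N i : Nat) (v : String) :
    ((List.range N).map f).set i v = (List.range N).map (fun j => if j = i then v else f j) := by
  apply List.ext_getElem (by simp)
  intro n h1 h2
  simp [List.getElem_set, eq_comm]

lemma flatMap_range_map (g : Nat → String) (H L : Nat) :
    (List.range H).flatMap (fun r => (List.range L).map (fun c => g (r * L + c)))
      = (List.range (H * L)).map g := by
  induction H with
  | zero => simp
  | succ n ih =>
    rw [List.range_succ, Nat.succ_mul, List.range_add]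
    simp [ih]

-- B's list equals the row-major map of cellG
lemma alt_list_eq (t : List Char) (H L : Nat) :
    ((PySem.List.pyRange 0 (H : Int) 1).flatMap (fun r =>
      (PySem.List.pyRange 0 (L : Int) 1).map (fun c =>
        if ql4Src (H : Int) r c < (t.length : Int)
        then ((PySem.List.pyGet? t (ql4Src (H : Int) r c)).map (fun ch => String.ofList [ch])).getD ""
        else "")))
    = (List.range (H * L)).map (cellG t H L) := by
  have hrH : PySem.List.pyRange 0 (H : Int) 1 = (List.range H).map (fun n => ((n : Nat) : Int)) := by
    rw [PySem.List.pyRange_one]; simp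
  have hrL : PySem.List.pyRange 0 (L : Int) 1 = (List.range L).map (fun n => ((n : Nat) : Int)) := by
    rw [PySem.List.pyRange_one]; simp
  rw [hrH, hrL, ← flatMap_range_map (cellG t H L) H L, List.flatMap_map]
  rw [List.flatMap_def, List.flatMap_def]
  congr 1
  apply List.map_congr_left
  intro r hr
  rw [List.mem_range] at hr
  rw [List.map_map]
  apply List.map_congr_left
  intro c hc
  rw [List.mem_range] at hc
  have hL : 0 < L := by omega
  simp only [Function.comp]
  have hsrc : ql4Src (H : Int) (r : Int) (c : Int)
      = ((c * H + (if c % 2 = 0 then r else H - r - 1) : Nat) : Int) := by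
    unfold ql4Src
    have hmod : PySem.Int.mod (c : Int) 2 = ((c % 2 : Nat) : Int) := by
      exact_mod_cast PySem.Int.mod_natCast c 2
    rcases Nat.mod_two_eq_zero_or_one c with hp | hp <;> simp [hmod, hp] <;> push_cast <;> omega
  set contN : Nat := c * H + (if c % 2 = 0 then r else H - r - 1) with hcontN
  have hmodL : (r * L + c) % L = c := by
    rw [Nat.mul_comm, Nat.mul_add_mod, Nat.mod_eq_of_lt hc]
  have hdivL : (r * L + c) / L = r := by
    rw [Nat.mul_comm, Nat.mul_add_div hL, Nat.div_eq_of_lt hc, Nat.add_zero]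
  have hcell : cellG t H L (r * L + c)
      = if hlt : contN < t.length then String.ofList [t[contN]] else "" := by
    unfold cellG
    rw [hmodL, hdivL]
  rw [hsrc, hcell]
  by_cases hlt : contN < t.length
  · rw [if_pos (show ((contN : Nat) : Int) < (t.length : Int) by exact_mod_cast hlt), dif_pos hlt]
    rw [PySem.List.pyGet?_natCast, List.getElem?_eq_getElem hlt]
    rfl
  · rw [if_neg (show ¬ ((contN : Nat) : Int) < (t.length : Int) by exact_mod_cast hlt), dif_neg hlt]

-- one inner step
lemma inner_step (t : List Char) (H L k m : Nat) (hk : k < L) (hm : m < H) :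
    ql4InnerStep t (H : Int) (L : Int) (k : Int) (decide (k % 2 = 1))
      ((List.range (H * L)).map (colFill t H L k m), ((k * H + m : Nat) : Int)) ((m : Nat) : Int)
    = ((List.range (H * L)).map (colFill t H L k (m + 1)), ((k * H + (m + 1) : Nat) : Int)) := by
  have hL : 0 < L := by omega
  unfold ql4InnerStep
  have hthh : (if decide (k % 2 = 1) = true then ((H : Int) - (m : Int) - 1) else (m : Int))
      = ((if k % 2 = 1 then H - m - 1 else m : Nat) : Int) := by
    by_cases hp : k % 2 = 1 <;> simp [hp] <;> omega
  set thhN : Nat := if k % 2 = 1 then H - m - 1 else m with hthhN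
  have hthhH : thhN < H := by rw [hthhN]; split <;> omega
  have hidx : (((thhN : Int)) * (L : Int) + (k : Int)).toNat = thhN * L + k := by
    push_cast; omega
  have hidxmod : (thhN * L + k) % L = k := by
    rw [Nat.mul_comm, Nat.mul_add_mod, Nat.mod_eq_of_lt hk]
  have hidxdiv : (thhN * L + k) / L = thhN := by
    rw [Nat.mul_comm, Nat.mul_add_div hL, Nat.div_eq_of_lt hk, Nat.add_zero]
  have hcell : cellG t H L (thhN * L + k)
      = if hlt : k * H + m < t.length then String.ofList [t[k * H + m]] else "" := by
    unfold cellG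
    rw [hidxmod, hidxdiv]
    have harg : k * H + (if k % 2 = 0 then thhN else H - thhN - 1) = k * H + m := by
      rw [hthhN]; rcases Nat.mod_two_eq_zero_or_one k with hp | hp <;> simp [hp] <;> omega
    simp only [harg]
  simp only [hthh, hidx]
  by_cases hg : k * H + m < t.length
  · rw [if_pos (show ((k * H + m : Nat) : Int) < (t.length : Int) by exact_mod_cast hg)]
    rw [set_map_range]
    simp only [Prod.mk.injEq]
    refine ⟨?_, ?_⟩
    · apply List.map_congr_left
      intro j hj
      rw [List.mem_range] at hj
      have hjd : L * (j / L) + j % L = j := Nat.div_add_mod j L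
      have hjL : j / L < H := Nat.div_lt_iff_lt_mul hL |>.mpr (by omega)
      by_cases hje : j = thhN * L + k
      · subst hje
        rw [if_pos rfl]
        have hget : PySem.List.pyGet? t ((k * H + m : Nat) : Int) = some t[k * H + m] := by
          rw [PySem.List.pyGet?_natCast]
          exact List.getElem?_eq_getElem hg
        rw [hget]
        unfold colFill
        rw [if_pos]
        · rw [hcell, dif_pos hg]; rfl
        · right
          refine ⟨hidxmod, ?_⟩
          rw [hidxdiv, hthhN]
          rcases Nat.mod_two_eq_zero_or_one k with hp | hp <;> simp [hp] <;> omega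
      · rw [if_neg hje]
        unfold colFill
        have key : ¬(j % L = k ∧ j / L = thhN) := by
          intro hc
          exact hje (by rw [← Nat.div_add_mod j L, hc.1, hc.2]; ring)
        have : (j % L < k ∨ (j % L = k ∧ (if k % 2 = 1 then H - m ≤ j / L else j / L < m)))
            ↔ (j % L < k ∨ (j % L = k ∧ (if k % 2 = 1 then H - (m + 1) ≤ j / L else j / L < m + 1))) := by
          rw [hthhN] at key
          rcases Nat.mod_two_eq_zero_or_one k with hp | hp <;> simp [hp] at key ⊢ <;> omega
        rw [if_congr this rfl rfl]
    · push_cast; omega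
  · rw [if_neg (show ¬ ((k * H + m : Nat) : Int) < (t.length : Int) by exact_mod_cast hg)]
    simp only [Prod.mk.injEq]
    refine ⟨?_, ?_⟩
    · apply List.map_congr_left
      intro j hj
      rw [List.mem_range] at hj
      have hjd : L * (j / L) + j % L = j := Nat.div_add_mod j L
      have hjL : j / L < H := Nat.div_lt_iff_lt_mul hL |>.mpr (by omega)
      by_cases hje : j = thhN * L + k
      · subst hje
        unfold colFill
        have h1 : ¬ ((thhN * L + k) % L < k ∨ ((thhN * L + k) % L = k ∧
            (if k % 2 = 1 then H - m ≤ (thhN * L + k) / L else (thhN * L + k) / L < m))) := by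
          rw [hidxmod, hidxdiv, hthhN]
          rcases Nat.mod_two_eq_zero_or_one k with hp | hp <;> simp [hp] <;> omega
        rw [if_neg h1]
        by_cases h2 : (thhN * L + k) % L < k ∨ ((thhN * L + k) % L = k ∧
            (if k % 2 = 1 then H - (m + 1) ≤ (thhN * L + k) / L else (thhN * L + k) / L < m + 1))
        · rw [if_pos h2, hcell, dif_neg hg]
        · rw [if_neg h2]
      · unfold colFill
        have key : ¬(j % L = k ∧ j / L = thhN) := by
          intro hc
          exact hje (by rw [← Nat.div_add_mod j L, hc.1, hc.2]; ring)
        have : (j % L < k ∨ (j % L = k ∧ (if k % 2 = 1 then H - m ≤ j / L else j / L < m)))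
            ↔ (j % L < k ∨ (j % L = k ∧ (if k % 2 = 1 then H - (m + 1) ≤ j / L else j / L < m + 1))) := by
          rw [hthhN] at key
          rcases Nat.mod_two_eq_zero_or_one k with hp | hp <;> simp [hp] at key ⊢ <;> omega
        rw [if_congr this rfl rfl]
    · push_cast; omega

-- inner loop invariant
lemma inner_fold (t : List Char) (H L k : Nat) (hk : k < L) (m : Nat) (hm : m ≤ H) :
    (List.range m).foldl
      (fun bc hxN => ql4InnerStep t (H : Int) (L : Int) (k : Int) (decide (k % 2 = 1)) bc ((hxN : Nat) : Int))
      ((List.range (H * L)).map (colFill t H L k 0), ((k * H : Nat) : Int))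
    = ((List.range (H * L)).map (colFill t H L k m), ((k * H + m : Nat) : Int)) := by
  induction m with
  | zero => simp
  | succ m ih =>
    rw [List.range_succ, List.foldl_append, ih (by omega), List.foldl_cons, List.foldl_nil,
      inner_step t H L k m hk (by omega)]

-- after a full column, the box is the start state of the next column
lemma colFill_full (t : List Char) (H L k : Nat) (hk : k < L) :
    (List.range (H * L)).map (colFill t H L k H) = (List.range (H * L)).map (colFill t H L (k + 1) 0) := by
  apply List.map_congr_left
  intro j hj
  rw [List.mem_range] at hj
  have hL : 0 < L := by by_contra h; omega
  have hjL : j / L < H := Nat.div_lt_iff_lt_mul hL |>.mpr (by omega)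
  unfold colFill
  have : (j % L < k ∨ (j % L = k ∧ (if k % 2 = 1 then H - H ≤ j / L else j / L < H)))
      ↔ (j % L < k + 1 ∨ (j % L = k + 1 ∧ (if (k + 1) % 2 = 1 then H - 0 ≤ j / L else j / L < 0))) := by
    rcases Nat.mod_two_eq_zero_or_one k with hp | hp <;>
      simp [hp, Nat.succ_mod_two_eq_one_iff, Nat.succ_mod_two_eq_zero_iff] <;> omega
  rw [if_congr this rfl rfl]

-- one outer step
lemma outer_step (t : List Char) (H L k : Nat) (hk : k < L) :
    ql4OuterStep t (H : Int) (L : Int)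
      ((List.range (H * L)).map (colFill t H L k 0), decide (k % 2 = 1), ((k * H : Nat) : Int)) ((k : Nat) : Int)
    = ((List.range (H * L)).map (colFill t H L (k + 1) 0), decide ((k + 1) % 2 = 1), (((k + 1) * H : Nat) : Int)) := by
  unfold ql4OuterStep
  have hr : PySem.List.pyRange 0 (H : Int) 1 = (List.range H).map (fun n => ((n : Nat) : Int)) := by
    rw [PySem.List.pyRange_one]; simp
  rw [hr, List.foldl_map]
  have := inner_fold t H L k hk H le_rfl
  simp only [this]
  rw [colFill_full t H L k hk]
  simp only [Prod.mk.injEq]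
  refine ⟨by trivial, ?_, ?_⟩
  · rcases Nat.mod_two_eq_zero_or_one k with hp | hp <;>
      simp [hp, Nat.succ_mod_two_eq_one_iff, Nat.succ_mod_two_eq_zero_iff]
  · push_cast; ring

-- outer loop invariant
lemma outer_fold (t : List Char) (H L : Nat) (k : Nat) (hk : k ≤ L) :
    (List.range k).foldl
      (fun st lxN => ql4OuterStep t (H : Int) (L : Int) st ((lxN : Nat) : Int))
      ((List.range (H * L)).map (colFill t H L 0 0), false, 0)
    = ((List.range (H * L)).map (colFill t H L k 0), decide (k % 2 = 1), ((k * H : Nat) : Int)) := by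
  induction k with
  | zero => simp
  | succ k ih =>
    rw [List.range_succ, List.foldl_append, ih (by omega), List.foldl_cons, List.foldl_nil,
      outer_step t H L k (by omega)]

-- the main positive case
lemma main_pos (t : List Char) (H L : Nat) :
    ((PySem.List.pyRange 0 (L : Int) 1).foldl (ql4OuterStep t (H : Int) (L : Int))
      (List.replicate (H * L) "", false, 0)).1
    = (List.range (H * L)).map (cellG t H L) := by
  have hrL : PySem.List.pyRange 0 (L : Int) 1 = (List.range L).map (fun n => ((n : Nat) : Int)) := by
    rw [PySem.List.pyRange_one]; simp
  have hinit : List.replicate (H * L) "" = (List.range (H * L)).map (colFill t H L 0 0) := by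
    have h1 : (List.range (H * L)).map (colFill t H L 0 0) = (List.range (H * L)).map (fun _ => "") := by
      apply List.map_congr_left
      intro j hj
      unfold colFill
      rw [if_neg (by simp)]
    rw [h1, List.map_const', List.length_range]
  rw [hrL, List.foldl_map, hinit]
  have := outer_fold t H L L le_rfl
  simp only [this]
  apply List.map_congr_left
  intro j hj
  rw [List.mem_range] at hj
  have hL : 0 < L := by
    rcases Nat.eq_zero_or_pos L with h0 | h0
    · rw [h0, Nat.mul_zero] at hj; omega
    · exact h0
  unfold colFill
  rw [if_pos (Or.inl (Nat.mod_lt j hL))]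

-- h ≤ 0: the inner range is empty, so the box is never touched
lemma outer_fold_neg (t : List Char) (h_ l : Int) (hh : h_ ≤ 0) (xs : List Int)
    (st : List String × Bool × Int) :
    (xs.foldl (ql4OuterStep t h_ l) st).1 = st.1 := by
  induction xs generalizing st with
  | nil => rfl
  | cons x xs ih =>
    rw [List.foldl_cons, ih]
    simp [ql4OuterStep, PySem.List.pyRange_one_eq_nil hh]

-- ===== VERDICT (by name: the statement is the Claim_ definition above) =====
theorem ql4_py_spec : Claim_equal_ql4_py := by
  intro txt h_ l _
  unfold Spec_ql4_py
  simp only [ql4_py, ql4_py_alt]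
  by_cases h0 : h_ = 0
  · simp [h0]
  · rw [if_neg h0, if_neg h0]
    set t := PySem.Chars.replace txt.toList [' '] [] with ht
    set l' := if l = 0 then PySem.Int.truncdiv (t.length : Int) h_ else l with hl'
    by_cases hneg : h_ < 0 ∨ l' < 0
    · rcases hneg with hh | hl
      · rw [outer_fold_neg t h_ l' (by omega),
          PySem.List.pyRange_one_eq_nil (show h_ ≤ 0 by omega)]
        have h1 : h_.toNat = 0 := by omega
        rw [h1, Nat.zero_mul, List.replicate_zero]
        rfl
      · have hr0 : PySem.List.pyRange 0 l' 1 = [] := PySem.List.pyRange_one_eq_nil (by omega)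
        have h1 : l'.toNat = 0 := by omega
        rw [hr0, h1, Nat.mul_zero, List.replicate_zero]
        simp
    · rw [not_or] at hneg
      have hH : h_ = ((h_.toNat : Nat) : Int) := by omega
      have hL : l' = ((l'.toNat : Nat) : Int) := by omega
      rw [hH, hL]
      simp only [Int.toNat_natCast]
      rw [main_pos t h_.toNat l'.toNat, alt_list_eq t h_.toNat l'.toNat]
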